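-- pv_equiv track=rewrite | github.com/ggomezarrufat/poker-results | app.py | categorizar_movimiento
-- ===== SOURCE A (Python) =====
-- def categorizar_movimiento(payment_category, payment_method, description):
--     """Categoriza automáticamente los movimientos basándose en los datos de WPN"""
--
--     # Mapeo de categorías de WPN a nuestras categorías
--     categoria_map = {
--         'OnDemand Tournament': 'Torneo',
--         'Scheduled Tournament': 'Torneo',
--         'Bonuses': 'Bonus',
--         'Deposit': 'Depósito',
--         'Comp Points': 'Puntos',
--         'P2P': 'Transferencia'
--     }
--
--     # Mapeo de métodos de pago a tipos de movimiento
--     tipo_movimiento_map = {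
--         'Winnings': 'Ganancia',
--         'Buy In': 'Buy-in',
--         'Reentry Buy In': 'Reentry Buy In',
--         'Unregister Buy In': 'Unregister Buy In',
--         'Fee': 'Fee',
--         'Reentry Fee': 'Reentry Fee',
--         'Unregister Fee': 'Unregister Fee',
--         'Bounty': 'Bounty',
--         'Sit & Crush Jackpot': 'Sit & Crush Jackpot',
--         'Deposit': 'Depósito',
--         'Withdrawal': 'Retiro',
--         'Achievements': 'Bonus',
--         'Points Exchange': 'Puntos',
--         'Player2Player': 'Transferencia',
--         'Money Added': 'Money Added',
--         'Money Out': 'Money Out',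
--         'Money In': 'Money In',
--         'Payout': 'Payout'
--     }
--
--     categoria = categoria_map.get(payment_category, 'Otro')
--     tipo_movimiento = tipo_movimiento_map.get(payment_method, 'Otro')
--
--     # Determinar tipo de juego basándose en la descripción
--     desc_lower = description.lower()
--
--     # CORRECCIÓN: Si el tipo de movimiento es Money Added, Money Out o Money In,
--     # la categoría debe ser Cash
--     if tipo_movimiento in ['Money Added', 'Money Out', 'Money In']:
--         categoria = 'Cash'
--
--     # CORRECCIÓN: Si el tipo de movimiento es Payout, la categoría debe ser Retiro
--     if tipo_movimiento == 'Payout':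
--         categoria = 'Retiro'
--
--     # CORRECCIÓN: Si el tipo de movimiento es de torneo y la descripción contiene indicadores de torneo,
--     # la categoría debe ser Torneo
--     tipos_movimiento_torneo = ['Buy-in', 'Ganancia', 'Bounty', 'Fee', 'Reentry Fee', 'Reentry Buy In', 'Unregister Buy In', 'Unregister Fee', 'Sit & Crush Jackpot']
--     if tipo_movimiento in tipos_movimiento_torneo and any(indicator in desc_lower for indicator in ['$', 'gtd', 'turbo', 'on demand', 'sit & go', 'sit&go', 'sitngo']):
--         categoria = 'Torneo'
--     if 'stud hi/lo' in desc_lower or 'stud hi lo' in desc_lower: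
--         tipo_juego = 'Stud Hi/Lo'
--     elif 'nlo8' in desc_lower or 'nl omaha 8' in desc_lower:
--         tipo_juego = 'NLO8'
--     elif 'plo hi/lo' in desc_lower or 'plo hi lo' in desc_lower:
--         tipo_juego = 'PLO Hi/Lo'
--     elif '5c plo8' in desc_lower or '5c plo 8' in desc_lower:
--         tipo_juego = '5C PLO8'
--     elif 'plo8' in desc_lower or 'plo 8' in desc_lower:
--         tipo_juego = 'PLO8'
--     elif 'plo' in desc_lower:
--         tipo_juego = 'PLO'
--     elif 'sit' in desc_lower and 'go' in desc_lower:
--         tipo_juego = 'Sit & Go'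
--     elif 'nlh' in desc_lower or 'holdem' in desc_lower:
--         tipo_juego = 'NLH'
--     elif 'tournament' in desc_lower or 'torneo' in desc_lower:
--         tipo_juego = 'Torneo'
--     else:
--         tipo_juego = 'Cash'
--
--     return categoria, tipo_movimiento, tipo_juego
-- ===== SOURCE B (Python) =====
-- # Restructured categorization: tipo_movimiento from an exception-dict + identity
-- # set instead of a full 18-key map; tipo_juego from a hierarchical decision tree
-- # gated on 'plo' (every finer PLO pattern contains 'plo'); the torneo correction
-- # tests the complement set of non-tournament tipos reachable at that point.
--
-- CATEGORIA_MAP = {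
--     'OnDemand Tournament': 'Torneo',
--     'Scheduled Tournament': 'Torneo',
--     'Bonuses': 'Bonus',
--     'Deposit': 'Depósito',
--     'Comp Points': 'Puntos',
--     'P2P': 'Transferencia',
-- }
--
-- # payment methods whose tipo differs from the method name itself
-- TIPO_EXCEPCIONES = {
--     'Winnings': 'Ganancia',
--     'Buy In': 'Buy-in',
--     'Deposit': 'Depósito',
--     'Withdrawal': 'Retiro',
--     'Achievements': 'Bonus',
--     'Points Exchange': 'Puntos',
--     'Player2Player': 'Transferencia',
-- }
--
-- # payment methods whose tipo is the method name unchanged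
-- TIPO_IDENTIDAD = frozenset({
--     'Reentry Buy In', 'Unregister Buy In', 'Fee', 'Reentry Fee',
--     'Unregister Fee', 'Bounty', 'Sit & Crush Jackpot',
--     'Money Added', 'Money Out', 'Money In', 'Payout',
-- })
--
-- # tipos that are NOT tournament-like (over the 19 reachable tipo values,
-- # once Money*/Payout are handled this is the complement of the torneo list)
-- NO_TORNEO = ('Depósito', 'Retiro', 'Bonus', 'Puntos', 'Transferencia', 'Otro')
--
-- INDICADORES = ['$', 'gtd', 'turbo', 'on demand', 'sit & go', 'sit&go', 'sitngo']
--
--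
-- def _tipo_juego(d):
--     if 'stud hi/lo' in d or 'stud hi lo' in d:
--         return 'Stud Hi/Lo'
--     if 'nlo8' in d or 'nl omaha 8' in d:
--         return 'NLO8'
--     if 'plo' in d:
--         # refine inside the PLO family: each finer pattern contains 'plo'
--         if 'plo hi/lo' in d or 'plo hi lo' in d:
--             return 'PLO Hi/Lo'
--         if '5c plo8' in d or '5c plo 8' in d:
--             return '5C PLO8'
--         if 'plo8' in d or 'plo 8' in d:
--             return 'PLO8'
--         return 'PLO'
--     if 'sit' in d and 'go' in d:
--         return 'Sit & Go'
--     if 'nlh' in d or 'holdem' in d: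
--         return 'NLH'
--     if 'tournament' in d or 'torneo' in d:
--         return 'Torneo'
--     return 'Cash'
--
--
-- def _categoria(payment_category, tipo, d):
--     if tipo in ('Money Added', 'Money Out', 'Money In'):
--         return 'Cash'
--     if tipo == 'Payout':
--         return 'Retiro'
--     if tipo not in NO_TORNEO and any(i in d for i in INDICADORES):
--         return 'Torneo'
--     return CATEGORIA_MAP.get(payment_category, 'Otro')
--
--
-- def categorizar_movimiento(payment_category, payment_method, description):
--     tipo = TIPO_EXCEPCIONES.get(
--         payment_method,
--         payment_method if payment_method in TIPO_IDENTIDAD else 'Otro')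
--     d = description.lower()
--     return _categoria(payment_category, tipo, d), tipo, _tipo_juego(d)
-- ===== Notes on version B (the rewrite author's own statement) =====
-- stated objective: alternative
-- what changed: tipo_movimiento is computed from a 7-entry exception dict plus an identity set instead of the full 18-key map; the tipo_juego cascade becomes a decision tree gated on whether 'plo' occurs (all finer PLO patterns contain 'plo'); and the torneo correction tests the complement of the non-tournament tipo values instead of membership in the 9-element torneo list.
import Mathlib
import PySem

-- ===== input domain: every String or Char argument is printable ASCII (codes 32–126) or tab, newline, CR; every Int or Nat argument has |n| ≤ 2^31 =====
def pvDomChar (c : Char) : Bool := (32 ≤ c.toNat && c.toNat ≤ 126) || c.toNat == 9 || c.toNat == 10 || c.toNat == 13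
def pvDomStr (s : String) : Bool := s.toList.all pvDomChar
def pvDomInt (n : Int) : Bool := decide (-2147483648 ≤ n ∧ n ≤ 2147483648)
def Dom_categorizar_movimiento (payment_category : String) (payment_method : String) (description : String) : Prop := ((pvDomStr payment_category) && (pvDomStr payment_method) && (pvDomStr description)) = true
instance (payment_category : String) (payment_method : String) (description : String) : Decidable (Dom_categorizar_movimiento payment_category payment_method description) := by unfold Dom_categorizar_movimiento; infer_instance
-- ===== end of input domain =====

set_option maxHeartbeats 1000000


-- B rebuilds the same categorization differently: tipo_movimiento from a 7-entry
-- exception dict plus an identity set, tipo_juego from a decision tree gated on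
-- 'plo', and the torneo correction as a complement-set test (alternative, same cost).

-- ===== PORT A =====
def categorizar_movimiento (payment_category : String) (payment_method : String) (description : String) : String × String × String :=
  let categoria_map : PySem.Dict String String := PySem.Dict.ofList
    [("OnDemand Tournament", "Torneo"), ("Scheduled Tournament", "Torneo"),
     ("Bonuses", "Bonus"), ("Deposit", "Depósito"), ("Comp Points", "Puntos"),
     ("P2P", "Transferencia")]
  let tipo_movimiento_map : PySem.Dict String String := PySem.Dict.ofList
    [("Winnings", "Ganancia"), ("Buy In", "Buy-in"), ("Reentry Buy In", "Reentry Buy In"),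
     ("Unregister Buy In", "Unregister Buy In"), ("Fee", "Fee"), ("Reentry Fee", "Reentry Fee"),
     ("Unregister Fee", "Unregister Fee"), ("Bounty", "Bounty"),
     ("Sit & Crush Jackpot", "Sit & Crush Jackpot"), ("Deposit", "Depósito"),
     ("Withdrawal", "Retiro"), ("Achievements", "Bonus"), ("Points Exchange", "Puntos"),
     ("Player2Player", "Transferencia"), ("Money Added", "Money Added"),
     ("Money Out", "Money Out"), ("Money In", "Money In"), ("Payout", "Payout")]
  let categoria := categoria_map.getD payment_category "Otro"
  let tipo_movimiento := tipo_movimiento_map.getD payment_method "Otro"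
  let desc_lower := PySem.Str.lower description
  let categoria := if (["Money Added", "Money Out", "Money In"] : List String).contains tipo_movimiento then "Cash" else categoria
  let categoria := if tipo_movimiento == "Payout" then "Retiro" else categoria
  let tipos_movimiento_torneo : List String := ["Buy-in", "Ganancia", "Bounty", "Fee", "Reentry Fee", "Reentry Buy In", "Unregister Buy In", "Unregister Fee", "Sit & Crush Jackpot"]
  let categoria := if tipos_movimiento_torneo.contains tipo_movimiento && (["$", "gtd", "turbo", "on demand", "sit & go", "sit&go", "sitngo"] : List String).any (fun i => PySem.Str.isIn i desc_lower) then "Torneo" else categoria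
  let tipo_juego :=
    if PySem.Str.isIn "stud hi/lo" desc_lower || PySem.Str.isIn "stud hi lo" desc_lower then "Stud Hi/Lo"
    else if PySem.Str.isIn "nlo8" desc_lower || PySem.Str.isIn "nl omaha 8" desc_lower then "NLO8"
    else if PySem.Str.isIn "plo hi/lo" desc_lower || PySem.Str.isIn "plo hi lo" desc_lower then "PLO Hi/Lo"
    else if PySem.Str.isIn "5c plo8" desc_lower || PySem.Str.isIn "5c plo 8" desc_lower then "5C PLO8"
    else if PySem.Str.isIn "plo8" desc_lower || PySem.Str.isIn "plo 8" desc_lower then "PLO8"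
    else if PySem.Str.isIn "plo" desc_lower then "PLO"
    else if PySem.Str.isIn "sit" desc_lower && PySem.Str.isIn "go" desc_lower then "Sit & Go"
    else if PySem.Str.isIn "nlh" desc_lower || PySem.Str.isIn "holdem" desc_lower then "NLH"
    else if PySem.Str.isIn "tournament" desc_lower || PySem.Str.isIn "torneo" desc_lower then "Torneo"
    else "Cash"
  (categoria, tipo_movimiento, tipo_juego)

-- ===== PORT B =====
def pvCategoriaMap : PySem.Dict String String := PySem.Dict.ofList
  [("OnDemand Tournament", "Torneo"), ("Scheduled Tournament", "Torneo"),
   ("Bonuses", "Bonus"), ("Deposit", "Depósito"), ("Comp Points", "Puntos"),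
   ("P2P", "Transferencia")]

-- payment methods whose tipo differs from the method name itself
def pvTipoExcepciones : PySem.Dict String String := PySem.Dict.ofList
  [("Winnings", "Ganancia"), ("Buy In", "Buy-in"), ("Deposit", "Depósito"),
   ("Withdrawal", "Retiro"), ("Achievements", "Bonus"),
   ("Points Exchange", "Puntos"), ("Player2Player", "Transferencia")]

-- payment methods whose tipo is the method name unchanged
def pvTipoIdentidad : PySem.Set String := PySem.Set.ofList
  ["Reentry Buy In", "Unregister Buy In", "Fee", "Reentry Fee",
   "Unregister Fee", "Bounty", "Sit & Crush Jackpot",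
   "Money Added", "Money Out", "Money In", "Payout"]

-- tipos that are NOT tournament-like
def pvNoTorneo : List String := ["Depósito", "Retiro", "Bonus", "Puntos", "Transferencia", "Otro"]

def pvIndicadores : List String := ["$", "gtd", "turbo", "on demand", "sit & go", "sit&go", "sitngo"]

def pvTipoJuego (d : String) : String :=
  if PySem.Str.isIn "stud hi/lo" d || PySem.Str.isIn "stud hi lo" d then "Stud Hi/Lo"
  else if PySem.Str.isIn "nlo8" d || PySem.Str.isIn "nl omaha 8" d then "NLO8"
  else if PySem.Str.isIn "plo" d then
    -- refine inside the PLO family: each finer pattern contains 'plo'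
    if PySem.Str.isIn "plo hi/lo" d || PySem.Str.isIn "plo hi lo" d then "PLO Hi/Lo"
    else if PySem.Str.isIn "5c plo8" d || PySem.Str.isIn "5c plo 8" d then "5C PLO8"
    else if PySem.Str.isIn "plo8" d || PySem.Str.isIn "plo 8" d then "PLO8"
    else "PLO"
  else if PySem.Str.isIn "sit" d && PySem.Str.isIn "go" d then "Sit & Go"
  else if PySem.Str.isIn "nlh" d || PySem.Str.isIn "holdem" d then "NLH"
  else if PySem.Str.isIn "tournament" d || PySem.Str.isIn "torneo" d then "Torneo"
  else "Cash"

def pvCategoria (payment_category tipo d : String) : String :=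
  if (["Money Added", "Money Out", "Money In"] : List String).contains tipo then "Cash"
  else if tipo == "Payout" then "Retiro"
  else if !(pvNoTorneo.contains tipo) && pvIndicadores.any (fun i => PySem.Str.isIn i d) then "Torneo"
  else pvCategoriaMap.getD payment_category "Otro"

def categorizar_movimiento_alt (payment_category : String) (payment_method : String) (description : String) : String × String × String :=
  let tipo := pvTipoExcepciones.getD payment_method
    (if PySem.Set.contains pvTipoIdentidad payment_method then payment_method else "Otro")
  let d := PySem.Str.lower description
  (pvCategoria payment_category tipo d, tipo, pvTipoJuego d)

-- ===== PRECONDITION & SPEC =====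
def Spec_categorizar_movimiento (payment_category : String) (payment_method : String) (description : String) (out : String × String × String) : Prop := out = categorizar_movimiento_alt payment_category payment_method description
instance (payment_category : String) (payment_method : String) (description : String) (out : String × String × String) : Decidable (Spec_categorizar_movimiento payment_category payment_method description out) := by unfold Spec_categorizar_movimiento; infer_instance

-- ===== CLAIM =====
def Claim_equal_categorizar_movimiento : Prop := ∀ (payment_category : String) (payment_method : String) (description : String), Dom_categorizar_movimiento payment_category payment_method description → Spec_categorizar_movimiento payment_category payment_method description (categorizar_movimiento payment_category payment_method description)

-- ===== LEMMAS AND PROOFS =====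

-- A's 18-key map lookup equals B's exception-dict + identity-set computation.
theorem pv_tipo_eq (pm : String) :
    (PySem.Dict.ofList
      [("Winnings", "Ganancia"), ("Buy In", "Buy-in"), ("Reentry Buy In", "Reentry Buy In"),
       ("Unregister Buy In", "Unregister Buy In"), ("Fee", "Fee"), ("Reentry Fee", "Reentry Fee"),
       ("Unregister Fee", "Unregister Fee"), ("Bounty", "Bounty"),
       ("Sit & Crush Jackpot", "Sit & Crush Jackpot"), ("Deposit", "Depósito"),
       ("Withdrawal", "Retiro"), ("Achievements", "Bonus"), ("Points Exchange", "Puntos"),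
       ("Player2Player", "Transferencia"), ("Money Added", "Money Added"),
       ("Money Out", "Money Out"), ("Money In", "Money In"), ("Payout", "Payout")] :
       PySem.Dict String String).getD pm "Otro"
    = pvTipoExcepciones.getD pm
        (if PySem.Set.contains pvTipoIdentidad pm then pm else "Otro") := by
  have e1 : (PySem.Dict.ofList
      [("Winnings", "Ganancia"), ("Buy In", "Buy-in"), ("Reentry Buy In", "Reentry Buy In"),
       ("Unregister Buy In", "Unregister Buy In"), ("Fee", "Fee"), ("Reentry Fee", "Reentry Fee"),
       ("Unregister Fee", "Unregister Fee"), ("Bounty", "Bounty"),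
       ("Sit & Crush Jackpot", "Sit & Crush Jackpot"), ("Deposit", "Depósito"),
       ("Withdrawal", "Retiro"), ("Achievements", "Bonus"), ("Points Exchange", "Puntos"),
       ("Player2Player", "Transferencia"), ("Money Added", "Money Added"),
       ("Money Out", "Money Out"), ("Money In", "Money In"), ("Payout", "Payout")] :
       PySem.Dict String String) = PySem.Dict.mk
      [("Winnings", "Ganancia"), ("Buy In", "Buy-in"), ("Reentry Buy In", "Reentry Buy In"),
       ("Unregister Buy In", "Unregister Buy In"), ("Fee", "Fee"), ("Reentry Fee", "Reentry Fee"),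
       ("Unregister Fee", "Unregister Fee"), ("Bounty", "Bounty"),
       ("Sit & Crush Jackpot", "Sit & Crush Jackpot"), ("Deposit", "Depósito"),
       ("Withdrawal", "Retiro"), ("Achievements", "Bonus"), ("Points Exchange", "Puntos"),
       ("Player2Player", "Transferencia"), ("Money Added", "Money Added"),
       ("Money Out", "Money Out"), ("Money In", "Money In"), ("Payout", "Payout")] := by decide
  have e2 : pvTipoExcepciones = PySem.Dict.mk
      [("Winnings", "Ganancia"), ("Buy In", "Buy-in"), ("Deposit", "Depósito"),
       ("Withdrawal", "Retiro"), ("Achievements", "Bonus"),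
       ("Points Exchange", "Puntos"), ("Player2Player", "Transferencia")] := by decide
  have e3 : pvTipoIdentidad = ["Reentry Buy In", "Unregister Buy In", "Fee", "Reentry Fee",
      "Unregister Fee", "Bounty", "Sit & Crush Jackpot",
      "Money Added", "Money Out", "Money In", "Payout"] := by decide
  rw [e1, e2, e3]
  by_cases h : pm ∈ (["Winnings", "Buy In", "Reentry Buy In", "Unregister Buy In", "Fee",
      "Reentry Fee", "Unregister Fee", "Bounty", "Sit & Crush Jackpot", "Deposit",
      "Withdrawal", "Achievements", "Points Exchange", "Player2Player", "Money Added",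
      "Money Out", "Money In", "Payout"] : List String)
  · fin_cases h <;> decide
  · simp only [List.mem_cons, List.not_mem_nil, or_false, not_or] at h
    obtain ⟨n1, n2, n3, n4, n5, n6, n7, n8, n9, n10, n11, n12, n13, n14, n15, n16, n17, n18⟩ := h
    simp [PySem.Dict.getD_eq_get?_getD, PySem.Dict.get?_mk_cons, PySem.Set.contains,
      n3, n4, n5, n6, n7, n8, n9, n15, n16, n17, n18,
      Ne.symm n1, Ne.symm n2, Ne.symm n3, Ne.symm n4, Ne.symm n5, Ne.symm n6, Ne.symm n7,
      Ne.symm n8, Ne.symm n9, Ne.symm n10, Ne.symm n11, Ne.symm n12, Ne.symm n13,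
      Ne.symm n14, Ne.symm n15, Ne.symm n16, Ne.symm n17, Ne.symm n18]

-- the tipo value is always one of the 19 reachable values
theorem pv_tipo_mem (pm : String) :
    pvTipoExcepciones.getD pm
        (if PySem.Set.contains pvTipoIdentidad pm then pm else "Otro")
      ∈ (["Ganancia", "Buy-in", "Depósito", "Retiro", "Bonus", "Puntos", "Transferencia",
          "Reentry Buy In", "Unregister Buy In", "Fee", "Reentry Fee", "Unregister Fee",
          "Bounty", "Sit & Crush Jackpot", "Money Added", "Money Out", "Money In",
          "Payout", "Otro"] : List String) := by
  rw [← pv_tipo_eq pm]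
  have e1 : (PySem.Dict.ofList
      [("Winnings", "Ganancia"), ("Buy In", "Buy-in"), ("Reentry Buy In", "Reentry Buy In"),
       ("Unregister Buy In", "Unregister Buy In"), ("Fee", "Fee"), ("Reentry Fee", "Reentry Fee"),
       ("Unregister Fee", "Unregister Fee"), ("Bounty", "Bounty"),
       ("Sit & Crush Jackpot", "Sit & Crush Jackpot"), ("Deposit", "Depósito"),
       ("Withdrawal", "Retiro"), ("Achievements", "Bonus"), ("Points Exchange", "Puntos"),
       ("Player2Player", "Transferencia"), ("Money Added", "Money Added"),
       ("Money Out", "Money Out"), ("Money In", "Money In"), ("Payout", "Payout")] :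
       PySem.Dict String String) = PySem.Dict.mk
      [("Winnings", "Ganancia"), ("Buy In", "Buy-in"), ("Reentry Buy In", "Reentry Buy In"),
       ("Unregister Buy In", "Unregister Buy In"), ("Fee", "Fee"), ("Reentry Fee", "Reentry Fee"),
       ("Unregister Fee", "Unregister Fee"), ("Bounty", "Bounty"),
       ("Sit & Crush Jackpot", "Sit & Crush Jackpot"), ("Deposit", "Depósito"),
       ("Withdrawal", "Retiro"), ("Achievements", "Bonus"), ("Points Exchange", "Puntos"),
       ("Player2Player", "Transferencia"), ("Money Added", "Money Added"),
       ("Money Out", "Money Out"), ("Money In", "Money In"), ("Payout", "Payout")] := by decide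
  rw [e1]
  by_cases h : pm ∈ (["Winnings", "Buy In", "Reentry Buy In", "Unregister Buy In", "Fee",
      "Reentry Fee", "Unregister Fee", "Bounty", "Sit & Crush Jackpot", "Deposit",
      "Withdrawal", "Achievements", "Points Exchange", "Player2Player", "Money Added",
      "Money Out", "Money In", "Payout"] : List String)
  · fin_cases h <;> decide
  · simp only [List.mem_cons, List.not_mem_nil, or_false, not_or] at h
    obtain ⟨n1, n2, n3, n4, n5, n6, n7, n8, n9, n10, n11, n12, n13, n14, n15, n16, n17, n18⟩ := h
    simp [PySem.Dict.getD_eq_get?_getD, PySem.Dict.get?,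
      Ne.symm n1, Ne.symm n2, Ne.symm n3, Ne.symm n4, Ne.symm n5, Ne.symm n6, Ne.symm n7,
      Ne.symm n8, Ne.symm n9, Ne.symm n10, Ne.symm n11, Ne.symm n12, Ne.symm n13,
      Ne.symm n14, Ne.symm n15, Ne.symm n16, Ne.symm n17, Ne.symm n18]

-- A's last-assignment-wins correction sequence equals B's early-return chain with
-- the complement-set torneo test, for every reachable tipo value.
theorem pv_categoria_eq (pc d t : String)
    (ht : t ∈ (["Ganancia", "Buy-in", "Depósito", "Retiro", "Bonus", "Puntos", "Transferencia",
          "Reentry Buy In", "Unregister Buy In", "Fee", "Reentry Fee", "Unregister Fee",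
          "Bounty", "Sit & Crush Jackpot", "Money Added", "Money Out", "Money In",
          "Payout", "Otro"] : List String)) :
    (if (["Buy-in", "Ganancia", "Bounty", "Fee", "Reentry Fee", "Reentry Buy In", "Unregister Buy In", "Unregister Fee", "Sit & Crush Jackpot"] : List String).contains t
        && (["$", "gtd", "turbo", "on demand", "sit & go", "sit&go", "sitngo"] : List String).any (fun i => PySem.Str.isIn i d) then "Torneo"
     else if t == "Payout" then "Retiro"
     else if (["Money Added", "Money Out", "Money In"] : List String).contains t then "Cash"
     else (PySem.Dict.ofList
        [("OnDemand Tournament", "Torneo"), ("Scheduled Tournament", "Torneo"),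
         ("Bonuses", "Bonus"), ("Deposit", "Depósito"), ("Comp Points", "Puntos"),
         ("P2P", "Transferencia")] : PySem.Dict String String).getD pc "Otro")
    = pvCategoria pc t d := by
  fin_cases ht <;>
    simp [pvCategoria, pvCategoriaMap, pvNoTorneo, pvIndicadores]

-- every finer PLO pattern contains 'plo'
theorem pv_plo_of_sub (sub : List Char) (d : String)
    (hs : (['p','l','o'] : List Char) <:+: sub)
    (h : PySem.Chars.isIn sub d.toList = true) :
    PySem.Chars.isIn ['p','l','o'] d.toList = true := by
  rw [PySem.Chars.isIn_iff_infix] at h ⊢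
  exact hs.trans h

-- the if/elif cascade equals the 'plo'-gated decision tree
theorem pv_juego_eq (d : String) :
    (if PySem.Str.isIn "stud hi/lo" d || PySem.Str.isIn "stud hi lo" d then "Stud Hi/Lo"
     else if PySem.Str.isIn "nlo8" d || PySem.Str.isIn "nl omaha 8" d then "NLO8"
     else if PySem.Str.isIn "plo hi/lo" d || PySem.Str.isIn "plo hi lo" d then "PLO Hi/Lo"
     else if PySem.Str.isIn "5c plo8" d || PySem.Str.isIn "5c plo 8" d then "5C PLO8"
     else if PySem.Str.isIn "plo8" d || PySem.Str.isIn "plo 8" d then "PLO8"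
     else if PySem.Str.isIn "plo" d then "PLO"
     else if PySem.Str.isIn "sit" d && PySem.Str.isIn "go" d then "Sit & Go"
     else if PySem.Str.isIn "nlh" d || PySem.Str.isIn "holdem" d then "NLH"
     else if PySem.Str.isIn "tournament" d || PySem.Str.isIn "torneo" d then "Torneo"
     else "Cash")
    = pvTipoJuego d := by
  unfold pvTipoJuego
  by_cases hp : PySem.Chars.isIn ['p','l','o'] d.toList = true
  · simp [hp]
  · have h1 : PySem.Chars.isIn ['p','l','o',' ','h','i','/','l','o'] d.toList = false := by
      cases h : PySem.Chars.isIn ['p','l','o',' ','h','i','/','l','o'] d.toList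
      · rfl
      · exact absurd (pv_plo_of_sub _ d (by decide) h) hp
    have h2 : PySem.Chars.isIn ['p','l','o',' ','h','i',' ','l','o'] d.toList = false := by
      cases h : PySem.Chars.isIn ['p','l','o',' ','h','i',' ','l','o'] d.toList
      · rfl
      · exact absurd (pv_plo_of_sub _ d (by decide) h) hp
    have h3 : PySem.Chars.isIn ['5','c',' ','p','l','o','8'] d.toList = false := by
      cases h : PySem.Chars.isIn ['5','c',' ','p','l','o','8'] d.toList
      · rfl
      · exact absurd (pv_plo_of_sub _ d (by decide) h) hp
    have h4 : PySem.Chars.isIn ['5','c',' ','p','l','o',' ','8'] d.toList = false := by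
      cases h : PySem.Chars.isIn ['5','c',' ','p','l','o',' ','8'] d.toList
      · rfl
      · exact absurd (pv_plo_of_sub _ d (by decide) h) hp
    have h5 : PySem.Chars.isIn ['p','l','o','8'] d.toList = false := by
      cases h : PySem.Chars.isIn ['p','l','o','8'] d.toList
      · rfl
      · exact absurd (pv_plo_of_sub _ d (by decide) h) hp
    have h6 : PySem.Chars.isIn ['p','l','o',' ','8'] d.toList = false := by
      cases h : PySem.Chars.isIn ['p','l','o',' ','8'] d.toList
      · rfl
      · exact absurd (pv_plo_of_sub _ d (by decide) h) hp
    simp [hp, h1, h2, h3, h4, h5, h6]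

theorem categorizar_movimiento_eq (pc pm d : String) :
    categorizar_movimiento pc pm d = categorizar_movimiento_alt pc pm d := by
  simp only [categorizar_movimiento, categorizar_movimiento_alt]
  rw [pv_tipo_eq pm]
  refine congrArg₂ Prod.mk ?_ (congrArg₂ Prod.mk rfl (pv_juego_eq _))
  exact pv_categoria_eq pc _ _ (pv_tipo_mem pm)

-- ===== VERDICT =====
theorem categorizar_movimiento_spec : Claim_equal_categorizar_movimiento := by
  intro pc pm d _
  exact categorizar_movimiento_eq pc pm d
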